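-- pv_equiv track=rewrite | github.com/georgebzhang/Python_LeetCode | dijkstra.py | paths
-- ===== SOURCE A (Python) =====
-- def paths(parents, start):
--     result = []
--     for child in parents:
--         path = [child]
--         parent = parents[child]
--         while True:
--             path.append(parent)
--             if parent == start:
--                 break
--             parent = parents[parent]
--         result.append(path)
--
--     return result
-- ===== SOURCE B (Python) =====
-- def paths(parents, start):
--     # Memoized: each node's root chain is built once and shared suffixes are reused
--     # instead of re-walking the parent links for every child.
--     chain = {}
--
--     def up(x):
--         stack = []
--         while x != start and x not in chain:
--             stack.append(x)
--             x = parents[x]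
--         cur = [start] if x == start else chain[x]
--         for y in reversed(stack):
--             cur = [y] + cur
--             chain[y] = cur
--         return cur
--
--     return [[child] + up(parents[child]) for child in parents]
-- ===== Notes on version B (the rewrite author's own statement) =====
-- stated objective: alternative
-- what changed: Replaces A's per-child re-walk of the parent links (nested while inside the for) by a single memoized pass: a chain dict caches each node's root path, an iterative walk stops at start or at a cached node and unwinds once, so shared suffixes are reused instead of re-walked.
-- outside the precondition, e.g. on paths({1: 5}, 0): A raises KeyError, B raises KeyError
import Mathlib
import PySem

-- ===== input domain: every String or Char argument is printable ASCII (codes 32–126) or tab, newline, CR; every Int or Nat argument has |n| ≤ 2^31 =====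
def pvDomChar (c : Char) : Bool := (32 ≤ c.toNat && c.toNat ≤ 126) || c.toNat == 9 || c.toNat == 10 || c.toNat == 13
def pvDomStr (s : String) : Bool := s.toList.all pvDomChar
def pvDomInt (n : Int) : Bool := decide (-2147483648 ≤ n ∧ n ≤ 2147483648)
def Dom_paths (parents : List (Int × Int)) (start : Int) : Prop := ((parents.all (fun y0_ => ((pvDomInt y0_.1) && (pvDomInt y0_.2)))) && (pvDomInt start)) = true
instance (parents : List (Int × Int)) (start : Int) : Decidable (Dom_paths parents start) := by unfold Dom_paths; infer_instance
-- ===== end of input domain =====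

-- B replaces A's per-child re-walk of the parent links by a memoized chain dict that
-- reuses shared suffixes (alternative decomposition; return values proved equal on Pre_).

-- parents[x] : the Python dict lookup (both Pythons receive `parents` as a dict)
def pvLook (parents : List (Int × Int)) (x : Int) : Option Int :=
  PySem.Dict.get? (PySem.Dict.mk parents) x

-- ===== PORT A =====
-- the `while True` walk; `none` from a lookup = Python's KeyError (outside Pre_)
def pathsLoopA (parents : List (Int × Int)) (start : Int) : Nat → Int → List Int → List Int
  | 0, parent, path => path ++ [parent]      -- fuel guard only; never reached under Pre_
  | fuel + 1, parent, path =>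
    let path := path ++ [parent]
    if parent = start then path
    else
      match pvLook parents parent with
      | none => path                          -- KeyError (outside Pre_)
      | some p => pathsLoopA parents start fuel p path

def paths (parents : List (Int × Int)) (start : Int) : List (List Int) :=
  parents.foldl (fun result cp =>
    match pvLook parents cp.1 with
    | none => result                          -- KeyError (outside Pre_)
    | some parent => result ++ [pathsLoopA parents start (parents.length + 1) parent [cp.1]]) []

-- ===== PORT B =====
-- the `while x != start and x not in chain` walk of Source B's `up` (fuel guard only)
def walkB (parents : List (Int × Int)) (start : Int) :
    Nat → PySem.Dict Int (List Int) → Int → List Int → List Int × Int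
  | 0, _, x, stack => (stack, x)
  | fuel + 1, chain, x, stack =>
    if x = start ∨ (chain.get? x).isSome then (stack, x)
    else
      match pvLook parents x with
      | none => (stack, x)                    -- KeyError (outside Pre_)
      | some p => walkB parents start fuel chain p (stack ++ [x])

-- Source B's `up`: walk up, then unwind `for y in reversed(stack)`, caching each chain
def upB (parents : List (Int × Int)) (start : Int) (chain : PySem.Dict Int (List Int))
    (x : Int) : List Int × PySem.Dict Int (List Int) :=
  let w := walkB parents start (parents.length + 1) chain x []
  let cur0 := if w.2 = start then [start] else chain.getD w.2 []
  w.1.reverse.foldl (fun acc y => (y :: acc.1, acc.2.insert y (y :: acc.1))) (cur0, chain)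

def paths_alt (parents : List (Int × Int)) (start : Int) : List (List Int) :=
  (parents.foldl (fun (acc : List (List Int) × PySem.Dict Int (List Int)) cp =>
    match pvLook parents cp.1 with
    | none => acc                             -- KeyError (outside Pre_)
    | some p =>
      let r := upB parents start acc.2 p
      (acc.1 ++ [cp.1 :: r.1], r.2)) ([], PySem.Dict.mk [])).1

-- ===== PRECONDITION & SPEC =====
-- one step up the parent link (none once a lookup has failed)
def pvStep (parents : List (Int × Int)) (o : Option Int) : Option Int :=
  o.bind (pvLook parents)

-- Pre_ excludes (a) inputs whose parent chain from some key never reaches `start`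
-- (there A loops forever or raises KeyError) and (b) assoc lists with duplicate keys,
-- which encode no Python dict at all (a dict cannot hold them).
def Pre_paths (parents : List (Int × Int)) (start : Int) : Prop :=
  (parents.map Prod.fst).Nodup ∧
  ∀ p ∈ parents, ∃ n ∈ Finset.Icc 1 parents.length,
    (pvStep parents)^[n] (some p.1) = some start

instance (parents : List (Int × Int)) (start : Int) : Decidable (Pre_paths parents start) := by
  unfold Pre_paths; infer_instance

def pvWitness_paths : (List (Int × Int)) × Int := ([(1, 0), (2, 1)], 0)

def Spec_paths (parents : List (Int × Int)) (start : Int) (out : List (List Int)) : Prop := out = paths_alt parents start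
instance (parents : List (Int × Int)) (start : Int) (out : List (List Int)) : Decidable (Spec_paths parents start out) := by unfold Spec_paths; infer_instance

-- ===== CLAIM (what is proved, stated in full; the proofs are below) =====
def Claim_equal_paths : Prop := ∀ (parents : List (Int × Int)) (start : Int), Dom_paths parents start → Pre_paths parents start → Spec_paths parents start (paths parents start)

-- ===== LEMMAS AND PROOFS =====

-- the canonical root chain of x: x :: … :: start, with fuel
def rc (parents : List (Int × Int)) (start : Int) : Nat → Int → Option (List Int)
  | 0, _ => none
  | f + 1, x =>
    if x = start then some [x]
    else (pvLook parents x).bind fun p => (rc parents start f p).map (x :: ·)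

-- the memo invariant: every cached chain is a root chain
def MemoInv (parents : List (Int × Int)) (start : Int) (chain : PySem.Dict Int (List Int)) : Prop :=
  ∀ y l, chain.get? y = some l → ∃ f, rc parents start f y = some l

theorem rc_unique (parents : List (Int × Int)) (start : Int) :
    ∀ f f' x l l', rc parents start f x = some l → rc parents start f' x = some l' → l = l' := by
  intro f
  induction f with
  | zero => intro f' x l l' h; simp [rc] at h
  | succ f ih =>
    intro f' x l l' h h'
    cases f' with
    | zero => simp [rc] at h'
    | succ f' =>
      simp only [rc] at h h'
      by_cases hx : x = start
      · rw [if_pos hx] at h h'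
        exact (Option.some.inj h).symm.trans (Option.some.inj h')
      · simp only [if_neg hx] at h h'
        cases hl : pvLook parents x with
        | none => simp [hl] at h
        | some p =>
          simp only [hl, Option.bind_some] at h h'
          cases h1 : rc parents start f p with
          | none => simp [h1] at h
          | some m =>
            cases h2 : rc parents start f' p with
            | none => simp [h2] at h'
            | some m' =>
              simp only [h1, h2, Option.map_some] at h h'
              cases h; cases h'
              exact congrArg (x :: ·) (ih f' p m m' h1 h2)

theorem rc_len_pos (parents : List (Int × Int)) (start : Int) :
    ∀ f x l, rc parents start f x = some l → 1 ≤ l.length := by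
  intro f
  induction f with
  | zero => intro x l h; simp [rc] at h
  | succ f ih =>
    intro x l h
    simp only [rc] at h
    by_cases hx : x = start
    · simp [hx] at h; subst h; simp
    · simp only [if_neg hx] at h
      cases hl : pvLook parents x with
      | none => simp [hl] at h
      | some p =>
        simp only [hl, Option.bind_some] at h
        cases h1 : rc parents start f p with
        | none => simp [h1] at h
        | some m => simp only [h1, Option.map_some] at h; cases h; simp

theorem loopA_spec (parents : List (Int × Int)) (start : Int) :
    ∀ f x l path fuel, rc parents start f x = some l → l.length ≤ fuel →
      pathsLoopA parents start fuel x path = path ++ l := by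
  intro f
  induction f with
  | zero => intro x l path fuel h; simp [rc] at h
  | succ f ih =>
    intro x l path fuel h hlen
    have hpos := rc_len_pos parents start (f + 1) x l h
    obtain ⟨g, rfl⟩ : ∃ g, fuel = g + 1 := ⟨fuel - 1, by omega⟩
    simp only [rc] at h
    by_cases hx : x = start
    · simp only [if_pos hx] at h
      cases h
      simp [pathsLoopA, hx]
    · simp only [if_neg hx] at h
      cases hl : pvLook parents x with
      | none => simp [hl] at h
      | some p =>
        simp only [hl, Option.bind_some] at h
        cases h1 : rc parents start f p with
        | none => simp [h1] at h
        | some m =>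
          simp only [h1, Option.map_some] at h
          cases h
          simp only [pathsLoopA, if_neg hx, hl]
          rw [ih p m (path ++ [x]) g h1 (by simp at hlen ⊢; omega)]
          simp

theorem step_none (parents : List (Int × Int)) :
    ∀ n, (pvStep parents)^[n] none = none := by
  intro n
  induction n with
  | zero => rfl
  | succ n ih => rw [Function.iterate_succ_apply, show pvStep parents none = none from rfl, ih]

theorem iterate_rc (parents : List (Int × Int)) (start : Int) :
    ∀ n x, (pvStep parents)^[n] (some x) = some start →
      ∃ f l, rc parents start f x = some l ∧ l.length ≤ n + 1 := by
  intro n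
  induction n with
  | zero =>
    intro x h
    simp only [Function.iterate_zero, id] at h
    obtain rfl : x = start := Option.some.inj h
    exact ⟨1, [x], by simp [rc], by simp⟩
  | succ n ih =>
    intro x h
    by_cases hx : x = start
    · exact ⟨1, [x], by simp [rc, hx], by simp⟩
    · rw [Function.iterate_succ_apply] at h
      cases hl : pvLook parents x with
      | none =>
        rw [show pvStep parents (some x) = none by simp [pvStep, hl], step_none] at h
        cases h
      | some p =>
        rw [show pvStep parents (some x) = some p by simp [pvStep, hl]] at h
        obtain ⟨f, l, hrc, hlen⟩ := ih p h
        exact ⟨f + 1, x :: l, by simp [rc, hx, hl, hrc], by simp; omega⟩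

theorem walk_spec (parents : List (Int × Int)) (start : Int) :
    ∀ fuel x stack l f chain, MemoInv parents start chain → rc parents start f x = some l →
      l.length ≤ fuel →
      ∃ s x' l', walkB parents start fuel chain x stack = (stack ++ s, x') ∧ l = s ++ l' ∧
        (if x' = start then [start] else chain.getD x' []) = l' ∧
        ∀ t1 y t2, s = t1 ++ y :: t2 →
          ∃ g, rc parents start g y = some (y :: (t2 ++ l')) := by
  intro fuel
  induction fuel with
  | zero =>
    intro x stack l f chain hInv hrc hlen
    have := rc_len_pos parents start f x l hrc
    omega
  | succ fuel ih =>
    intro x stack l f chain hInv hrc hlen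
    by_cases hstop : x = start ∨ (chain.get? x).isSome
    · refine ⟨[], x, l, ?_, by simp, ?_, by intro t1 y t2 h; simp at h⟩
      · simp [walkB, hstop]
      · rcases hstop with hx | hmem
        · subst hx
          obtain ⟨g, rfl⟩ : ∃ g, f = g + 1 := by
            cases f with
            | zero => simp [rc] at hrc
            | succ g => exact ⟨g, rfl⟩
          simp only [rc] at hrc
          cases hrc
          simp
        · obtain ⟨l0, hl0⟩ := Option.isSome_iff_exists.mp hmem
          obtain ⟨g, hg⟩ := hInv x l0 hl0
          have : l0 = l := rc_unique parents start g f x l0 l hg hrc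
          subst this
          by_cases hx : x = start
          · subst hx
            obtain ⟨g', rfl⟩ : ∃ g', f = g' + 1 := by
              cases f with
              | zero => simp [rc] at hrc
              | succ g' => exact ⟨g', rfl⟩
            simp only [rc] at hrc
            cases hrc
            simp
          · simp [PySem.Dict.getD_eq_get?_getD, hl0, hx]
    · rw [not_or] at hstop
      obtain ⟨hx, hnm⟩ := hstop
      have hnone : chain.get? x = none := by
        cases h : chain.get? x with
        | none => rfl
        | some v => rw [h] at hnm; simp at hnm
      obtain ⟨g, rfl⟩ : ∃ g, f = g + 1 := by
        cases f with
        | zero => simp [rc] at hrc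
        | succ g' => exact ⟨g', rfl⟩
      simp only [rc, if_neg hx] at hrc
      cases hl : pvLook parents x with
      | none => simp [hl] at hrc
      | some p =>
        simp only [hl, Option.bind_some] at hrc
        cases h1 : rc parents start g p with
        | none => simp [h1] at hrc
        | some m =>
          simp only [h1, Option.map_some] at hrc
          cases hrc
          obtain ⟨s2, x', l', hw, hm, hbase, hsplit⟩ :=
            ih p (stack ++ [x]) m g chain hInv h1 (by simp at hlen; omega)
          refine ⟨x :: s2, x', l', ?_, by simp [hm], hbase, ?_⟩
          · rw [show walkB parents start (fuel + 1) chain x stack =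
                walkB parents start fuel chain p (stack ++ [x]) by
                  simp [walkB, hx, hnone, hl]]
            rw [hw]; simp
          · intro t1 y t2 hst
            cases t1 with
            | nil =>
              simp at hst
              obtain ⟨rfl, rfl⟩ := hst
              exact ⟨g + 1, by simp [rc, hx, hl, h1, hm]⟩
            | cons a t1' =>
              simp at hst
              obtain ⟨rfl, hst⟩ := hst
              exact hsplit t1' y t2 hst

theorem unwind_spec (parents : List (Int × Int)) (start : Int) :
    ∀ (r : List Int) cur chain, MemoInv parents start chain →
      (∀ t1 y t2, r = t1 ++ y :: t2 →
        ∃ g, rc parents start g y = some (y :: (t1.reverse ++ cur))) →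
      (r.foldl (fun acc y => (y :: acc.1, acc.2.insert y (y :: acc.1))) (cur, chain)).1
          = r.reverse ++ cur ∧
        MemoInv parents start
          (r.foldl (fun acc y => (y :: acc.1, acc.2.insert y (y :: acc.1))) (cur, chain)).2 := by
  intro r
  induction r with
  | nil => intro cur chain hInv _; exact ⟨by simp, hInv⟩
  | cons y r' ih =>
    intro cur chain hInv hsplit
    have hy : ∃ g, rc parents start g y = some (y :: cur) := by
      obtain ⟨g, hg⟩ := hsplit [] y r' rfl
      exact ⟨g, by simpa using hg⟩
    have hInv' : MemoInv parents start (chain.insert y (y :: cur)) := by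
      intro z l hz
      rw [PySem.Dict.get?_insert] at hz
      by_cases hzy : z = y
      · rw [if_pos hzy] at hz
        cases hz
        exact hzy ▸ hy
      · rw [if_neg hzy] at hz
        exact hInv z l hz
    have hsplit' : ∀ t1 z t2, r' = t1 ++ z :: t2 →
        ∃ g, rc parents start g z = some (z :: (t1.reverse ++ (y :: cur))) := by
      intro t1 z t2 ht
      obtain ⟨g, hg⟩ := hsplit (y :: t1) z t2 (by simp [ht])
      exact ⟨g, by simpa using hg⟩
    obtain ⟨h1, h2⟩ := ih (y :: cur) (chain.insert y (y :: cur)) hInv' hsplit'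
    constructor
    · simp only [List.foldl_cons]
      rw [h1]; simp
    · simpa using h2

theorem upB_spec (parents : List (Int × Int)) (start : Int)
    (chain : PySem.Dict Int (List Int)) (x : Int) (f : Nat) (l : List Int)
    (hInv : MemoInv parents start chain) (hrc : rc parents start f x = some l)
    (hlen : l.length ≤ parents.length + 1) :
    (upB parents start chain x).1 = l ∧ MemoInv parents start (upB parents start chain x).2 := by
  obtain ⟨s, x', l', hw, hm, hbase, hsplit⟩ :=
    walk_spec parents start (parents.length + 1) x [] l f chain hInv hrc hlen
  unfold upB
  rw [hw]
  simp only [List.nil_append]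
  have hsplit' : ∀ t1 y t2, s.reverse = t1 ++ y :: t2 →
      ∃ g, rc parents start g y = some (y :: (t1.reverse ++ l')) := by
    intro t1 y t2 ht
    have hs : s = t2.reverse ++ y :: t1.reverse := by
      have := congrArg List.reverse ht
      simpa using this
    obtain ⟨g, hg⟩ := hsplit t2.reverse y t1.reverse hs
    exact ⟨g, hg⟩
  have := unwind_spec parents start s.reverse
    (if x' = start then [start] else chain.getD x' []) chain hInv
    (by rw [hbase]; exact hsplit')
  obtain ⟨h1, h2⟩ := this
  refine ⟨?_, h2⟩
  rw [h1]
  simp [hm, hbase]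

theorem fold_eq (parents : List (Int × Int)) (start : Int) :
    ∀ (l : List (Int × Int)),
      (∀ p ∈ l, ∃ n ∈ Finset.Icc 1 parents.length,
        (pvStep parents)^[n] (some p.1) = some start) →
      ∀ (res : List (List Int)) (chain : PySem.Dict Int (List Int)),
        MemoInv parents start chain →
        l.foldl (fun result cp =>
          match pvLook parents cp.1 with
          | none => result
          | some parent => result ++ [pathsLoopA parents start (parents.length + 1) parent [cp.1]]) res
        = (l.foldl (fun (acc : List (List Int) × PySem.Dict Int (List Int)) cp =>
            match pvLook parents cp.1 with
            | none => acc
            | some p =>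
              let r := upB parents start acc.2 p
              (acc.1 ++ [cp.1 :: r.1], r.2)) (res, chain)).1 := by
  intro l
  induction l with
  | nil => intro _ res chain _; simp
  | cons cp l' ih =>
    intro hPre res chain hInv
    obtain ⟨n, hn, hit⟩ := hPre cp (by simp)
    simp only [Finset.mem_Icc] at hn
    obtain ⟨m, rfl⟩ : ∃ m, n = m + 1 := ⟨n - 1, by omega⟩
    rw [Function.iterate_succ_apply] at hit
    cases hl : pvLook parents cp.1 with
    | none =>
      rw [show pvStep parents (some cp.1) = none by simp [pvStep, hl], step_none] at hit
      cases hit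
    | some p =>
      rw [show pvStep parents (some cp.1) = some p by simp [pvStep, hl]] at hit
      obtain ⟨f, ch, hrc, hlen⟩ := iterate_rc parents start m p hit
      obtain ⟨hup1, hup2⟩ := upB_spec parents start chain p f ch hInv hrc (by omega)
      simp only [List.foldl_cons, hl]
      rw [ih (fun q hq => hPre q (by simp [hq])) _ _ hup2]
      congr 2
      rw [loopA_spec parents start f p ch [cp.1] (parents.length + 1) hrc (by omega), hup1]
      simp

-- ===== VERDICT (by name: the statement is the Claim_ definition above) =====
theorem paths_spec : Claim_equal_paths := by
  intro parents start _ hPre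
  unfold Spec_paths paths paths_alt
  exact fold_eq parents start parents hPre.2 [] (PySem.Dict.mk [])
    (fun y l h => by simp [PySem.Dict.get?] at h)
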